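-- pv_equiv track=rewrite | github.com/geluzhiwei1/davybot | agent/dawei/knowledge/chunking/chunker.py | _resolve_page_number
-- ===== SOURCE A (Python) =====
-- from typing import List, Dict, Any
--
-- def _resolve_page_number(char_offset: int, page_offsets: Dict[int, int]) -> int | None:
--     """Resolve page number from character offset using page_offsets mapping.
--
--     Uses binary-style lookup: find the last page whose offset <= char_offset.
--
--     Args:
--         char_offset: Character position in the full document content.
--         page_offsets: Mapping of {page_num(1-based): char_offset}.
--
--     Returns:
--         Page number (1-based) or None if page_offsets is empty.
--     """
--     if not page_offsets:
--         return None
--     sorted_pages = sorted(page_offsets.items(), key=lambda x: x[1])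
--     result = sorted_pages[0][0]  # default to first page
--     for page_num, offset in sorted_pages:
--         if offset <= char_offset:
--             result = page_num
--         else:
--             break
--     return result
-- ===== SOURCE B (Python) =====
-- def _resolve_page_number(char_offset: int, page_offsets: dict) -> int | None:
--     """One linear pass: track the best page (largest offset <= char_offset,
--     last insertion wins ties) and the min-offset page (first insertion wins)
--     as fallback; no sorting."""
--     min_page = min_off = None
--     best_page = best_off = None
--     for page, off in page_offsets.items():
--         if min_page is None or off < min_off:
--             min_page, min_off = page, off
--         if off <= char_offset and (best_page is None or off >= best_off):
--             best_page, best_off = page, off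
--     return best_page if best_page is not None else min_page
-- ===== Notes on version B (the rewrite author's own statement) =====
-- stated objective: alternative
-- what changed: Replaces A's sort of all items followed by a break-on-overshoot scan with a single linear pass that maintains the running min-offset page (fallback) and the best page with offset <= char_offset, with tie-breaks (last insertion wins for best, first for min) matching the stable sort.
import Mathlib
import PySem

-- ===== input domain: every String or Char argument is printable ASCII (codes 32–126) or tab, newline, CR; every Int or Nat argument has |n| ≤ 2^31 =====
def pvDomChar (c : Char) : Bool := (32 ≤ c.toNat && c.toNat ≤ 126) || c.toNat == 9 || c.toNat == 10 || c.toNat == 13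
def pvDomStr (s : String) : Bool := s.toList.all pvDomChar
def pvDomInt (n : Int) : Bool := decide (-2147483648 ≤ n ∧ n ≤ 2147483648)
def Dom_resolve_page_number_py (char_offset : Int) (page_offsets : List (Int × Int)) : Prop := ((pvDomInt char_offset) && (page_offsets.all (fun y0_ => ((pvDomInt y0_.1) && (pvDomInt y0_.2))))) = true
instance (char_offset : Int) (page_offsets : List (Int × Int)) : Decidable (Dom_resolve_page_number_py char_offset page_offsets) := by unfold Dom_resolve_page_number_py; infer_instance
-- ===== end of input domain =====

-- B replaces A's sort-then-scan by one linear pass keeping the running min-offset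
-- page (fallback) and the best page with offset ≤ char_offset (objective: alternative, sort-free).

-- ===== PORT A =====
-- the 'for … if offset <= char_offset: result = page_num else: break' loop of A
def pvLoopA (c : Int) : Int → List (Int × Int) → Int
  | res, [] => res
  | res, (p, o) :: t => if o ≤ c then pvLoopA c p t else res

def resolve_page_number_py (char_offset : Int) (page_offsets : List (Int × Int)) : Option Int :=
  match PySem.List.sorted page_offsets (fun x => x.2) false with
  | [] => none
  | hd :: tl => some (pvLoopA char_offset hd.1 (hd :: tl))

-- ===== PORT B =====
-- one step of B's loop: update (min_page/min_off, best_page/best_off)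
def pvStepB (c : Int) (st : Option (Int × Int) × Option (Int × Int)) (x : Int × Int) :
    Option (Int × Int) × Option (Int × Int) :=
  (match st.1 with
   | none => some x
   | some m => if x.2 < m.2 then some x else some m,
   if x.2 ≤ c then
     match st.2 with
     | none => some x
     | some b => if b.2 ≤ x.2 then some x else some b
   else st.2)

def resolve_page_number_py_alt (char_offset : Int) (page_offsets : List (Int × Int)) : Option Int :=
  let st := page_offsets.foldl (pvStepB char_offset) (none, none)
  match st.2 with
  | some b => some b.1
  | none => st.1.map (fun m => m.1)

-- ===== PRECONDITION & SPEC =====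
def Spec_resolve_page_number_py (char_offset : Int) (page_offsets : List (Int × Int)) (out : Option Int) : Prop := out = resolve_page_number_py_alt char_offset page_offsets
instance (char_offset : Int) (page_offsets : List (Int × Int)) (out : Option Int) : Decidable (Spec_resolve_page_number_py char_offset page_offsets out) := by unfold Spec_resolve_page_number_py; infer_instance

-- ===== CLAIM (what is proved, stated in full; the proofs are below) =====
def Claim_equal_resolve_page_number_py : Prop := ∀ (char_offset : Int) (page_offsets : List (Int × Int)), Dom_resolve_page_number_py char_offset page_offsets → Spec_resolve_page_number_py char_offset page_offsets (resolve_page_number_py char_offset page_offsets)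

-- ===== LEMMAS AND PROOFS =====

-- A's loop returns the first component of the last element of the ≤-c prefix
-- of the (sorted) list, or the default if that prefix is empty.
theorem pvLoopA_eq (c : Int) (s : List (Int × Int)) : ∀ res : Int,
    pvLoopA c res s =
      (((s.takeWhile (fun y => decide (y.2 ≤ c))).getLast?).map (fun b => b.1)).getD res := by
  induction s with
  | nil => intro res; simp [pvLoopA]
  | cons x t ih =>
    intro res
    obtain ⟨p, o⟩ := x
    by_cases h : o ≤ c
    · simp [pvLoopA, h, ih p, List.getLast?_cons]
      cases (t.takeWhile (fun y => decide (y.2 ≤ c))).getLast? <;> simp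
    · simp [pvLoopA, h]

-- inserting x into a list: the head is the smaller of x and the old head
-- (strict comparison, so the old head wins ties) — B's min_page update.
theorem pvHead_insertBy (x : Int × Int) (s : List (Int × Int)) :
    (PySem.List.insertBy (fun a b => decide (a.2 < b.2)) x s).head? =
      some (match s.head? with
            | none => x
            | some m => if x.2 < m.2 then x else m) := by
  cases s with
  | nil => simp [PySem.List.insertBy]
  | cons m t =>
    by_cases h : x.2 < m.2 <;> simp [PySem.List.insertBy, h]

-- B's best_page update, as a function of the old best
def pvBestStep (c : Int) (x : Int × Int) (o : Option (Int × Int)) : Option (Int × Int) :=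
  if x.2 ≤ c then
    match o with
    | none => some x
    | some b => if b.2 ≤ x.2 then some x else some b
  else o

-- inserting x into a sorted list transforms the last element of the ≤-c
-- prefix exactly as B's best_page update does.
theorem pvLast_tw_insertBy (c : Int) (x : Int × Int) (s : List (Int × Int))
    (hs : s.Pairwise (fun a b => a.2 ≤ b.2)) :
    ((PySem.List.insertBy (fun a b => decide (a.2 < b.2)) x s).takeWhile
        (fun y => decide (y.2 ≤ c))).getLast? =
      pvBestStep c x ((s.takeWhile (fun y => decide (y.2 ≤ c))).getLast? ) := by
  induction s with
  | nil =>
    by_cases h : x.2 ≤ c <;> simp [PySem.List.insertBy, pvBestStep, h]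
  | cons m t ih =>
    have hmt : ∀ y ∈ t, m.2 ≤ y.2 := (List.pairwise_cons.mp hs).1
    have ht : t.Pairwise (fun a b => a.2 ≤ b.2) := (List.pairwise_cons.mp hs).2
    by_cases hxm : x.2 < m.2
    · -- x goes in front
      by_cases hxc : x.2 ≤ c
      · -- prefix starts with x
        rw [show PySem.List.insertBy (fun a b => decide (a.2 < b.2)) x (m :: t)
              = x :: m :: t by simp [PySem.List.insertBy, hxm]]
        rw [List.takeWhile_cons_of_pos (by simpa using hxc), List.getLast?_cons]
        rcases hlast : ((m :: t).takeWhile (fun y => decide (y.2 ≤ c))).getLast? with _ | ⟨b⟩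
        · simp [pvBestStep, hxc, hlast]
        · have hbmem : b ∈ (m :: t).takeWhile (fun y => decide (y.2 ≤ c)) :=
            List.mem_of_getLast? hlast
          have hb : b ∈ m :: t := (List.takeWhile_prefix _).subset hbmem
          have hmb : m.2 ≤ b.2 := by
            rcases List.mem_cons.mp hb with h | h
            · simp [h]
            · exact hmt b h
          have : ¬ b.2 ≤ x.2 := by omega
          simp [pvBestStep, hxc, hlast, this]
      · -- x.2 > c and x.2 < m.2, so both prefixes are empty
        have hmc : ¬ m.2 ≤ c := by omega
        rw [show PySem.List.insertBy (fun a b => decide (a.2 < b.2)) x (m :: t)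
              = x :: m :: t by simp [PySem.List.insertBy, hxm]]
        rw [List.takeWhile_cons_of_neg (by simpa using hxc),
            List.takeWhile_cons_of_neg (by simpa using hmc)]
        simp [pvBestStep, hxc]
    · -- x goes after m
      rw [show PySem.List.insertBy (fun a b => decide (a.2 < b.2)) x (m :: t)
            = m :: PySem.List.insertBy (fun a b => decide (a.2 < b.2)) x t by
          simp [PySem.List.insertBy, hxm]]
      by_cases hmc : m.2 ≤ c
      · rw [List.takeWhile_cons_of_pos (by simpa using hmc),
            List.takeWhile_cons_of_pos (by simpa using hmc),
            List.getLast?_cons, List.getLast?_cons, ih ht]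
        -- the best-step commutes with "default to m", since m.2 ≤ x.2
        rcases hlast : (t.takeWhile (fun y => decide (y.2 ≤ c))).getLast? with _ | ⟨b⟩
        · by_cases hxc : x.2 ≤ c <;>
            simp [pvBestStep, hxc, hlast, show m.2 ≤ x.2 by omega]
        · by_cases hxc : x.2 ≤ c
          · by_cases hbx : b.2 ≤ x.2 <;> simp [pvBestStep, hxc, hlast, hbx]
          · simp [pvBestStep, hxc, hlast]
      · -- m.2 > c, hence x.2 > c too: both prefixes empty
        have hxc : ¬ x.2 ≤ c := by omega
        rw [List.takeWhile_cons_of_neg (by simpa using hmc),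
            List.takeWhile_cons_of_neg (by simpa using hmc)]
        simp [pvBestStep, hxc]

-- main invariant of B's fold: its min component is the head of the sorted
-- list and its best component is the last element of the sorted ≤-c prefix.
theorem pvFold_inv (c : Int) (l : List (Int × Int)) :
    (l.foldl (pvStepB c) (none, none)).1
        = (PySem.List.sorted l (fun x => x.2) false).head?
    ∧ (l.foldl (pvStepB c) (none, none)).2
        = ((PySem.List.sorted l (fun x => x.2) false).takeWhile
            (fun y => decide (y.2 ≤ c))).getLast? := by
  induction l using List.reverseRecOn with
  | nil => simp [PySem.List.sorted]
  | append_singleton l x ih =>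
    have hsrt : ∀ m : List (Int × Int),
        PySem.List.sorted m (fun x => x.2) false
          = m.foldl (fun acc y => PySem.List.insertBy (fun a b => decide (a.2 < b.2)) y acc) [] :=
      fun m => PySem.List.sorted_eq_foldl_insertBy m (fun x => x.2)
    have hs : PySem.List.sorted (l ++ [x]) (fun x => x.2) false
        = PySem.List.insertBy (fun a b => decide (a.2 < b.2)) x
            (PySem.List.sorted l (fun x => x.2) false) := by
      rw [hsrt, hsrt, List.foldl_append]; simp
    have hpw : (PySem.List.sorted l (fun x => x.2) false).Pairwise
        (fun a b => a.2 ≤ b.2) := PySem.List.sorted_pairwise l (fun x => x.2)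
    rw [List.foldl_append]
    constructor
    · rw [hs, pvHead_insertBy]
      simp only [List.foldl_cons, List.foldl_nil, pvStepB, ih.1]
      cases (PySem.List.sorted l (fun x => x.2) false).head? <;> simp
      split <;> rfl
    · rw [hs, pvLast_tw_insertBy c x _ hpw]
      simp only [List.foldl_cons, List.foldl_nil, pvStepB, pvBestStep, ih.2]

-- ===== VERDICT (by name: the statement is the Claim_ definition above) =====
theorem resolve_page_number_py_spec : Claim_equal_resolve_page_number_py := by
  intro c l _
  unfold Spec_resolve_page_number_py resolve_page_number_py resolve_page_number_py_alt
  obtain ⟨h1, h2⟩ := pvFold_inv c l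
  rcases hsort : PySem.List.sorted l (fun x => x.2) false with _ | ⟨hd, tl⟩
  · rw [hsort] at h1 h2
    simp at h1 h2
    simp [h1, h2]
  · rw [hsort] at h1 h2
    show some (pvLoopA c hd.1 (hd :: tl)) = _
    rw [pvLoopA_eq]
    simp only [h2]
    rcases hlast : ((hd :: tl).takeWhile (fun y => decide (y.2 ≤ c))).getLast? with _ | ⟨b⟩
    · simp [h1, List.head?_cons, hlast]
    · simp [hlast]
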